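-- pv_equiv track=rewrite | github.com/Koval-16/niduc | voting_algorithm.py | majority_algorithm_tolerance
-- ===== SOURCE A (Python) =====
-- def majority_algorithm_tolerance(values, tolerance):
--     if not values: return None
--     votes = {val: 0 for val in values}
--     for val in values:
--         for candidate in values:
--             if abs(val - candidate) <= tolerance:
--                 votes[candidate] += 1
--     max_votes = max(votes.values())
--     candidates = [val for val, count in votes.items() if count == max_votes]
--     if max_votes > len(values) // 2:
--         return candidates[0]
--     return None
-- ===== SOURCE B (Python) =====
-- def majority_algorithm_tolerance(values, tolerance):
--     if not values:
--         return None
--     counts = {}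
--     for v in values:
--         counts[v] = counts.get(v, 0) + 1
--     best = None
--     best_score = 0
--     for c in counts:
--         near = 0
--         for v2, k in counts.items():
--             if abs(v2 - c) <= tolerance:
--                 near += k
--         score = counts[c] * near
--         if score > best_score:
--             best, best_score = c, score
--     if best_score > len(values) // 2:
--         return best
--     return None
-- ===== Notes on version B (the rewrite author's own statement) =====
-- stated objective: faster
-- what changed: A increments a votes dict over all n^2 (voter, candidate) pairs and then takes max + filter; B builds a frequency dict once, scores each distinct value with the closed formula count(c)*near(c) over distinct values only, and picks the winner with a single-pass running argmax.
import Mathlib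
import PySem

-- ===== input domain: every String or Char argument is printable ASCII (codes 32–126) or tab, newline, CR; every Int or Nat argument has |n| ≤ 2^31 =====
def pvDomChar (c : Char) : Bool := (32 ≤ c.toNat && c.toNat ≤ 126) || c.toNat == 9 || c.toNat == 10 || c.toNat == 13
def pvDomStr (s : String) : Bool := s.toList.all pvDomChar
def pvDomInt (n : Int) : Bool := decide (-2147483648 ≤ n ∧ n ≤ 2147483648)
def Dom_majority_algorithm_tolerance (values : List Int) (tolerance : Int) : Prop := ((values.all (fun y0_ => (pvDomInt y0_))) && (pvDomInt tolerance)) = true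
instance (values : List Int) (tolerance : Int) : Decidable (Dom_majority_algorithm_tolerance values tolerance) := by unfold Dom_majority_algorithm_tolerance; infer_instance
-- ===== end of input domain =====

-- B replaces A's O(n^2) pairwise vote-increment loop by a frequency dict scored per distinct
-- value with the closed formula count(c)*near(c) and a single-pass running argmax
-- (O(n + d^2) for d distinct values; measured faster on a timing run's inputs).


-- ===== PORT A =====
def majority_algorithm_tolerance (values : List Int) (tolerance : Int) : Option Int :=
  if values = [] then none else
  let votes0 : PySem.Dict Int Int := values.foldl (fun d v => d.insert v 0) PySem.Dict.empty
  let votes := values.foldl (fun d val =>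
      values.foldl (fun d cand =>
        if |val - cand| ≤ tolerance then d.modify cand 0 (· + 1) else d) d) votes0
  match PySem.List.max? votes.values (fun x => x) with
  | none => none
  | some max_votes =>
    let candidates := (votes.items.filter (fun p => p.2 == max_votes)).map (·.1)
    if max_votes > PySem.Int.floordiv (values.length : Int) 2 then
      PySem.List.pyGet? candidates 0
    else none

-- ===== PORT B =====
def majority_algorithm_tolerance_alt (values : List Int) (tolerance : Int) : Option Int :=
  if values = [] then none else
  let counts : PySem.Dict Int Int := values.foldl (fun d v => d.insert v (d.getD v 0 + 1)) PySem.Dict.empty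
  let r := counts.keys.foldl (fun (bs : Option Int × Int) c =>
      let near := counts.items.foldl (fun acc p => if |p.1 - c| ≤ tolerance then acc + p.2 else acc) 0
      let score := counts.getD c 0 * near
      if score > bs.2 then (some c, score) else bs) (none, 0)
  if r.2 > PySem.Int.floordiv (values.length : Int) 2 then r.1 else none

-- ===== PRECONDITION & SPEC =====
def Spec_majority_algorithm_tolerance (values : List Int) (tolerance : Int) (out : Option Int) : Prop := out = majority_algorithm_tolerance_alt values tolerance
instance (values : List Int) (tolerance : Int) (out : Option Int) : Decidable (Spec_majority_algorithm_tolerance values tolerance out) := by unfold Spec_majority_algorithm_tolerance; infer_instance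

-- ===== CLAIM (what is proved, stated in full; the proofs are below) =====
def Claim_equal_majority_algorithm_tolerance : Prop := ∀ (values : List Int) (tolerance : Int), Dom_majority_algorithm_tolerance values tolerance → Spec_majority_algorithm_tolerance values tolerance (majority_algorithm_tolerance values tolerance)

-- ===== LEMMAS AND PROOFS =====


-- pvScore values tolerance c: the number of (voter, candidate-occurrence) pairs A credits to c.
def pvScore (values : List Int) (tolerance : Int) (c : Int) : Int :=
  (values.countP (fun v => decide (|v - c| ≤ tolerance)) : Int) * (values.count c : Int)

theorem pv_inner_getD (tol val c : Int) (vs : List Int) (d : PySem.Dict Int Int) :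
    (vs.foldl (fun d cand => if |val - cand| ≤ tol then d.modify cand 0 (· + 1) else d) d).getD c 0
      = d.getD c 0 + (if |val - c| ≤ tol then (vs.count c : Int) else 0) := by
  induction vs generalizing d with
  | nil => simp
  | cons x xs ih =>
    simp only [List.foldl_cons, List.count_cons]
    by_cases hc : |val - x| ≤ tol
    · rw [if_pos hc, ih, PySem.Dict.getD_modify]
      by_cases hx : c = x
      · subst hx; simp [hc]; omega
      · have hxc : ¬ x = c := fun h => hx h.symm
        simp [hx, hxc]
    · rw [if_neg hc, ih]
      by_cases hcc : |val - c| ≤ tol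
      · have hxc : ¬ x = c := by rintro rfl; exact hc hcc
        simp [hcc, hxc]
      · simp [hcc]

theorem pv_outer_getD (tol c : Int) (inner vs : List Int) (d : PySem.Dict Int Int) :
    (vs.foldl (fun d val => inner.foldl
        (fun d cand => if |val - cand| ≤ tol then d.modify cand 0 (· + 1) else d) d) d).getD c 0
      = d.getD c 0 + (vs.countP (fun val => decide (|val - c| ≤ tol)) : Int) * (inner.count c : Int) := by
  induction vs generalizing d with
  | nil => simp
  | cons x xs ih =>
    simp only [List.foldl_cons, ih, pv_inner_getD, List.countP_cons, decide_eq_true_eq]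
    split_ifs <;> push_cast <;> ring

theorem pv_zero_getD (vs : List Int) (d : PySem.Dict Int Int) (c : Int) :
    (vs.foldl (fun d v => d.insert v (0 : Int)) d).getD c 0 = if c ∈ vs then 0 else d.getD c 0 := by
  induction vs generalizing d with
  | nil => simp
  | cons x xs ih =>
    simp only [List.foldl_cons, ih, PySem.Dict.getD_insert, List.mem_cons]
    by_cases hx : c = x <;> by_cases hm : c ∈ xs <;> simp [hx, hm]

theorem pv_zero_getD_empty (vs : List Int) (c : Int) :
    (vs.foldl (fun d v => d.insert v (0 : Int)) (PySem.Dict.empty : PySem.Dict Int Int)).getD c 0 = 0 := by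
  refine (pv_zero_getD vs PySem.Dict.empty c).trans ?_
  split <;> simp [PySem.Dict.getD_empty]

theorem pv_inner_keys (tol val : Int) (vs : List Int) (d : PySem.Dict Int Int)
    (h : ∀ x ∈ vs, d.contains x = true) :
    (vs.foldl (fun d cand => if |val - cand| ≤ tol then d.modify cand 0 (· + 1) else d) d).keys
      = d.keys := by
  induction vs generalizing d with
  | nil => rfl
  | cons x xs ih =>
    simp only [List.foldl_cons]
    by_cases hc : |val - x| ≤ tol
    · rw [if_pos hc, ih, PySem.Dict.keys_modify, PySem.Dict.keys_insert_of_contains _ _ (h x (List.mem_cons_self))]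
      intro y hy
      rw [PySem.Dict.contains_modify]
      simp [h y (List.mem_cons_of_mem _ hy)]
    · rw [if_neg hc, ih]
      intro y hy; exact h y (List.mem_cons_of_mem _ hy)

theorem pv_outer_keys (tol : Int) (inner vs : List Int) (d : PySem.Dict Int Int)
    (h : ∀ x ∈ inner, d.contains x = true) :
    (vs.foldl (fun d val => inner.foldl
        (fun d cand => if |val - cand| ≤ tol then d.modify cand 0 (· + 1) else d) d) d).keys
      = d.keys := by
  induction vs generalizing d with
  | nil => rfl
  | cons x xs ih =>
    simp only [List.foldl_cons]
    rw [ih, pv_inner_keys _ _ _ _ h]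
    intro y hy
    rw [PySem.Dict.contains_iff_mem_keys, pv_inner_keys _ _ _ _ h,
      ← PySem.Dict.contains_iff_mem_keys]
    exact h y hy

theorem pv_head_filter {α : Type} (p : α → Bool) (l : List α) :
    (l.filter p).head? = l.find? p := by
  induction l with
  | nil => rfl
  | cons x xs ih => by_cases hx : p x <;> simp [hx, ih]

theorem pv_countP_split (l : List Int) (p : Int → Bool) (k : Int) :
    l.countP p = (l.filter (fun a => a ≠ k)).countP p + (if p k then l.count k else 0) := by
  induction l with
  | nil => simp
  | cons a l ih =>
    by_cases hak : a = k <;> by_cases hpa : p a <;>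
      simp_all <;> omega

theorem pv_near (p : Int → Bool) (l K : List Int) (hnd : K.Nodup) (hsub : ∀ v ∈ l, v ∈ K) :
    ((K.filter p).map (fun k => (l.count k : Int))).sum = (l.countP p : Int) := by
  induction K generalizing l with
  | nil =>
    cases l with
    | nil => simp
    | cons v l => exact absurd (hsub v (List.mem_cons_self)) (List.not_mem_nil)
  | cons k K ih =>
    have hknotin : k ∉ K := (List.nodup_cons.mp hnd).1
    have hndK : K.Nodup := (List.nodup_cons.mp hnd).2
    have hcongr : (K.filter p).map (fun k' => (l.count k' : Int))
        = (K.filter p).map (fun k' => ((l.filter (fun a => a ≠ k)).count k' : Int)) := by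
      apply List.map_congr_left
      intro x hx
      have hxK : x ∈ K := (List.mem_filter.mp hx).1
      have hxk : x ≠ k := fun h => hknotin (h ▸ hxK)
      congr 1
      rw [List.count_filter]
      simp [hxk]
    have hsub' : ∀ v ∈ l.filter (fun a => a ≠ k), v ∈ K := by
      intro v hv
      have h1 := (List.mem_filter.mp hv).1
      have h2 := (List.mem_filter.mp hv).2
      have := hsub v h1
      simp only [decide_not, Bool.not_eq_eq_eq_not, Bool.not_true, decide_eq_false_iff_not] at h2
      rcases List.mem_cons.mp this with h | h
      · exact absurd h h2
      · exact h
    rw [List.filter_cons]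
    by_cases hpk : p k
    · simp only [hpk, if_pos]
      rw [List.map_cons, List.sum_cons, hcongr, ih _ hndK hsub',
        pv_countP_split l p k, if_pos hpk]
      push_cast; ring
    · simp only [hpk]
      rw [if_neg (by simp), hcongr, ih _ hndK hsub',
        pv_countP_split l p k, if_neg (by simp [hpk])]
      push_cast; ring

theorem pv_fold_argmax (f : Int → Int) (ks : List Int) (b : Option Int) (s : Int) :
    ks.foldl (fun bs c => if f c > bs.2 then (some c, f c) else bs) (b, s)
      = if (ks.map f).foldl max s > s
        then (ks.find? (fun c => f c == (ks.map f).foldl max s), (ks.map f).foldl max s)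
        else (b, s) := by
  induction ks generalizing b s with
  | nil => simp
  | cons c ks ih =>
    simp only [List.foldl_cons, List.map_cons, List.find?_cons]
    have hmax := (PySem.List.le_foldl_max (ks.map f) (max s (f c))).1
    by_cases hc : f c > s
    · rw [if_pos hc, ih]
      have hms : max s (f c) = f c := by omega
      rw [hms]
      have hge : f c ≤ (ks.map f).foldl max (f c) := by rw [hms] at hmax; exact hmax
      by_cases hM : (ks.map f).foldl max (f c) > f c
      · rw [if_pos hM, if_pos (by omega)]
        have : (f c == (ks.map f).foldl max (f c)) = false := by simp; omega
        rw [this]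
      · have hMeq : (ks.map f).foldl max (f c) = f c := by omega
        rw [if_neg hM, hMeq, if_pos hc]
        simp
    · rw [if_neg hc, ih]
      have hms : max s (f c) = s := by omega
      rw [hms]
      by_cases hM : (ks.map f).foldl max s > s
      · rw [if_pos hM, if_pos hM]
        have : (f c == (ks.map f).foldl max s) = false := by simp; omega
        rw [this]
      · rw [if_neg hM, if_neg hM]

theorem pv_score_nonneg (values : List Int) (tolerance c : Int) :
    0 ≤ pvScore values tolerance c := by
  unfold pvScore
  positivity

theorem pv_keys_insert0 (vs : List Int) (d : PySem.Dict Int Int) :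
    (vs.foldl (fun d v => d.insert v (0 : Int)) d).keys = PySem.Set.update d.keys vs := by
  induction vs generalizing d with
  | nil => simp [PySem.Set.update_nil]
  | cons x xs ih =>
    rw [List.foldl_cons, ih, PySem.Set.update_cons]
    congr 1
    by_cases hx : d.contains x = true
    · rw [PySem.Dict.keys_insert_of_contains _ _ hx,
        PySem.Set.add_of_mem ((PySem.Dict.contains_iff_mem_keys _ _).mp hx)]
    · rw [PySem.Dict.keys_insert_of_not_contains _ _ (by simpa using hx),
        PySem.Set.add_of_not_mem]
      intro hmem; exact hx ((PySem.Dict.contains_iff_mem_keys _ _).mpr hmem)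

theorem pv_A_char (tolerance a : Int) (as : List Int) :
    majority_algorithm_tolerance (a :: as) tolerance
      = (if ((PySem.Set.discard (PySem.Set.ofList as) a).map (pvScore (a :: as) tolerance)).foldl max
              (pvScore (a :: as) tolerance a)
            > PySem.Int.floordiv (((a :: as).length : Int)) 2
         then (PySem.Set.ofList (a :: as)).find?
                (fun k => pvScore (a :: as) tolerance k ==
                  ((PySem.Set.discard (PySem.Set.ofList as) a).map (pvScore (a :: as) tolerance)).foldl max
                    (pvScore (a :: as) tolerance a))
         else none) := by
  have hne : (a :: as) ≠ ([] : List Int) := by simp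
  have hkeys0 : ((a :: as).foldl (fun d v => d.insert v (0 : Int)) PySem.Dict.empty).keys
      = PySem.Set.ofList (a :: as) := by
    rw [pv_keys_insert0, PySem.Dict.keys_empty, PySem.Set.update_nil_left]
  have hcont0 : ∀ x ∈ (a :: as),
      ((a :: as).foldl (fun d v => d.insert v (0 : Int)) PySem.Dict.empty).contains x = true := by
    intro x hx
    exact (PySem.Dict.contains_iff_mem_keys _ _).mpr (by rw [hkeys0]; exact (PySem.Set.mem_ofList _ _).mpr hx)
  have hkeys : ((a :: as).foldl (fun d val => (a :: as).foldl
        (fun d cand => if |val - cand| ≤ tolerance then d.modify cand 0 (· + 1) else d) d)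
        ((a :: as).foldl (fun d v => d.insert v (0 : Int)) PySem.Dict.empty)).keys
      = PySem.Set.ofList (a :: as) := by
    rw [pv_outer_keys _ _ _ _ hcont0, hkeys0]
  have hnd : ((a :: as).foldl (fun d val => (a :: as).foldl
        (fun d cand => if |val - cand| ≤ tolerance then d.modify cand 0 (· + 1) else d) d)
        ((a :: as).foldl (fun d v => d.insert v (0 : Int)) PySem.Dict.empty)).keys.Nodup := by
    rw [hkeys]; exact PySem.Set.nodup_ofList _
  have hgetD : ∀ c, ((a :: as).foldl (fun d val => (a :: as).foldl
        (fun d cand => if |val - cand| ≤ tolerance then d.modify cand 0 (· + 1) else d) d)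
        ((a :: as).foldl (fun d v => d.insert v (0 : Int)) PySem.Dict.empty)).getD c 0
      = pvScore (a :: as) tolerance c := by
    intro c
    rw [pv_outer_getD, pv_zero_getD_empty]
    unfold pvScore
    ring
  have hvalues : ((a :: as).foldl (fun d val => (a :: as).foldl
        (fun d cand => if |val - cand| ≤ tolerance then d.modify cand 0 (· + 1) else d) d)
        ((a :: as).foldl (fun d v => d.insert v (0 : Int)) PySem.Dict.empty)).values
      = (PySem.Set.ofList (a :: as)).map (pvScore (a :: as) tolerance) := by
    rw [PySem.Dict.values_eq_map_keys _ hnd 0, hkeys]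
    exact List.map_congr_left (fun k _ => hgetD k)
  have hitems : ((a :: as).foldl (fun d val => (a :: as).foldl
        (fun d cand => if |val - cand| ≤ tolerance then d.modify cand 0 (· + 1) else d) d)
        ((a :: as).foldl (fun d v => d.insert v (0 : Int)) PySem.Dict.empty)).items
      = (PySem.Set.ofList (a :: as)).map (fun k => (k, pvScore (a :: as) tolerance k)) := by
    rw [PySem.Dict.items_eq_map_keys _ hnd 0, hkeys]
    exact List.map_congr_left (fun k _ => by rw [hgetD])
  simp only [majority_algorithm_tolerance, if_neg hne, hvalues, hitems]
  rw [PySem.Set.ofList_cons, List.map_cons, PySem.List.max?_id_cons]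
  simp only [List.filter_map, List.map_map, Function.comp_def, PySem.List.pyGet?_zero,
    ← List.head?_eq_getElem?, List.map_id', pv_head_filter]

theorem pv_B_char (tolerance a : Int) (as : List Int) :
    majority_algorithm_tolerance_alt (a :: as) tolerance
      = (if ((PySem.Set.discard (PySem.Set.ofList as) a).map (pvScore (a :: as) tolerance)).foldl max
              (pvScore (a :: as) tolerance a)
            > PySem.Int.floordiv (((a :: as).length : Int)) 2
         then (PySem.Set.ofList (a :: as)).find?
                (fun k => pvScore (a :: as) tolerance k ==
                  ((PySem.Set.discard (PySem.Set.ofList as) a).map (pvScore (a :: as) tolerance)).foldl max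
                    (pvScore (a :: as) tolerance a))
         else none) := by
  have hne : (a :: as) ≠ ([] : List Int) := by simp
  have hnear : ∀ c : Int,
      (((PySem.Set.ofList (a :: as)).map (fun k => (k, ((a :: as).count k : Int)))).foldl
        (fun acc p => if |p.1 - c| ≤ tolerance then acc + p.2 else acc) 0)
      = ((a :: as).countP (fun v => decide (|v - c| ≤ tolerance)) : Int) := by
    intro c
    rw [PySem.List.foldl_ite_eq_foldl_filter, List.filter_map, PySem.List.foldl_add]
    simp only [List.map_map, Function.comp_def, zero_add]
    exact pv_near _ _ _ (PySem.Set.nodup_ofList _) (fun v hv => (PySem.Set.mem_ofList _ _).mpr hv)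
  have hscore : ∀ c : Int,
      ((a :: as).count c : Int) * ((a :: as).countP (fun v => decide (|v - c| ≤ tolerance)) : Int)
      = pvScore (a :: as) tolerance c := by
    intro c; unfold pvScore; ring
  have h0 : 0 ≤ PySem.Int.floordiv (((a :: as).length : Int)) 2 := by
    rw [PySem.Int.floordiv_eq_ediv_of_pos (by norm_num)]
    positivity
  simp only [majority_algorithm_tolerance_alt, if_neg hne,
    PySem.Dict.foldl_insert_getD_add_one_eq_counter, PySem.Dict.getD_counter,
    PySem.Dict.items_counter, PySem.Dict.keys_counter, hnear, hscore]
  rw [pv_fold_argmax (pvScore (a :: as) tolerance) (PySem.Set.ofList (a :: as)) none 0]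
  have hM0 : ((PySem.Set.ofList (a :: as)).map (pvScore (a :: as) tolerance)).foldl max 0
      = ((PySem.Set.discard (PySem.Set.ofList as) a).map (pvScore (a :: as) tolerance)).foldl max
          (pvScore (a :: as) tolerance a) := by
    rw [PySem.Set.ofList_cons, List.map_cons, List.foldl_cons,
      max_eq_right (pv_score_nonneg (a :: as) tolerance a)]
  rw [hM0]
  by_cases hM : ((PySem.Set.discard (PySem.Set.ofList as) a).map (pvScore (a :: as) tolerance)).foldl max
      (pvScore (a :: as) tolerance a) > 0
  · rw [if_pos hM]
  · rw [if_neg hM]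
    have hga := pv_score_nonneg (a :: as) tolerance a
    have hle := (PySem.List.le_foldl_max ((PySem.Set.discard (PySem.Set.ofList as) a).map
      (pvScore (a :: as) tolerance)) (pvScore (a :: as) tolerance a)).1
    have hMeq : ((PySem.Set.discard (PySem.Set.ofList as) a).map (pvScore (a :: as) tolerance)).foldl max
        (pvScore (a :: as) tolerance a) = 0 := by omega
    rw [hMeq, if_neg (by omega), if_neg (by omega)]

-- ===== VERDICT (by name: the statement is the Claim_ definition above) =====
theorem majority_algorithm_tolerance_spec : Claim_equal_majority_algorithm_tolerance := by
  intro values tolerance _hdom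
  unfold Spec_majority_algorithm_tolerance
  cases values with
  | nil => rfl
  | cons a as => rw [pv_A_char, pv_B_char]
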